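-- pv_equiv track=rewrite | github.com/matthematics/schubmult | src/schubmult/combinatorics/indexed_forests.py | _eq_except_trailing_zeros
-- ===== SOURCE A (Python) =====
-- def _eq_except_trailing_zeros(cd1, cd2):
--     i1 = len(cd1) - 1
--     while i1 >= 0 and cd1[i1] == 0:
--         i1 -= 1
--     i2 = len(cd2) - 1
--     while i2 >= 0 and cd2[i2] == 0:
--         i2 -= 1
--     return cd1[: i1 + 1] == cd2[: i2 + 1]
-- ===== SOURCE B (Python) =====
-- def _eq_except_trailing_zeros(cd1, cd2):
--     # Single forward pass over the aligned elements, padding the shorter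
--     # sequence with zeros; short-circuits on the first mismatch.
--     for i in range(max(len(cd1), len(cd2))):
--         a = cd1[i] if i < len(cd1) else 0
--         b = cd2[i] if i < len(cd2) else 0
--         if a != b:
--             return False
--     return True
-- ===== Notes on version B (the rewrite author's own statement) =====
-- stated objective: idiomatic
-- what changed: Replaces the two backward trailing-zero trim loops plus slice comparison with one forward element-wise pass that pads the shorter list with zeros and short-circuits on the first mismatch.
import Mathlib
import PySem

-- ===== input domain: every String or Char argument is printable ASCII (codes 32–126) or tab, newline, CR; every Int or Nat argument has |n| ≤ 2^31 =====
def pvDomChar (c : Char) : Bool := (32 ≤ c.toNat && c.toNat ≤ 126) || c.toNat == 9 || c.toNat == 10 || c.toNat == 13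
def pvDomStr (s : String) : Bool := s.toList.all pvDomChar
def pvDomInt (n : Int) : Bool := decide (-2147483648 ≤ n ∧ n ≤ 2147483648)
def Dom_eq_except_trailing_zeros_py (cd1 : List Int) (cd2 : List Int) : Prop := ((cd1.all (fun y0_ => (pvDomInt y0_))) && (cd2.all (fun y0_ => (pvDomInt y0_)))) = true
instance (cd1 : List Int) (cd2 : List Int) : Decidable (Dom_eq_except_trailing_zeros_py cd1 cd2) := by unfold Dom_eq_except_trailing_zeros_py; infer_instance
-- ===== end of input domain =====

-- B replaces the two backward trailing-zero trim loops and slice comparison with one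
-- forward aligned pass that pads the shorter list with zeros (idiomatic; same cost).


-- ===== PORT A =====
-- the 'while i >= 0 and cd[i] == 0: i -= 1' loop
def pvAwhile (cd : List Int) (i : Int) : Int :=
  if h : i ≥ 0 ∧ PySem.List.pyGet? cd i = some 0 then pvAwhile cd (i - 1) else i
termination_by (i + 1).toNat
decreasing_by omega

def eq_except_trailing_zeros_py (cd1 : List Int) (cd2 : List Int) : Bool :=
  let i1 := pvAwhile cd1 ((cd1.length : Int) - 1)
  let i2 := pvAwhile cd2 ((cd2.length : Int) - 1)
  PySem.List.slice cd1 none (some (i1 + 1)) == PySem.List.slice cd2 none (some (i2 + 1))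

-- ===== PORT B =====
-- the forward pass over index-aligned pairs, missing entries read as 0
def pvBloop : List Int → List Int → Bool
  | [], [] => true
  | a :: xs, [] => a == 0 && pvBloop xs []
  | [], b :: ys => (0 : Int) == b && pvBloop [] ys
  | a :: xs, b :: ys => a == b && pvBloop xs ys

def eq_except_trailing_zeros_py_alt (cd1 : List Int) (cd2 : List Int) : Bool :=
  pvBloop cd1 cd2

-- ===== PRECONDITION & SPEC =====
def Spec_eq_except_trailing_zeros_py (cd1 : List Int) (cd2 : List Int) (out : Bool) : Prop := out = eq_except_trailing_zeros_py_alt cd1 cd2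
instance (cd1 : List Int) (cd2 : List Int) (out : Bool) : Decidable (Spec_eq_except_trailing_zeros_py cd1 cd2 out) := by unfold Spec_eq_except_trailing_zeros_py; infer_instance

-- ===== CLAIM (what is proved, stated in full; the proofs are below) =====
def Claim_equal_eq_except_trailing_zeros_py : Prop := ∀ (cd1 : List Int) (cd2 : List Int), Dom_eq_except_trailing_zeros_py cd1 cd2 → Spec_eq_except_trailing_zeros_py cd1 cd2 (eq_except_trailing_zeros_py cd1 cd2)

-- ===== LEMMAS AND PROOFS =====

/-- `cd` with its trailing zeros removed. -/
def pvTrim : List Int → List Int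
  | [] => []
  | a :: t => let r := pvTrim t; if r = [] ∧ a = 0 then [] else a :: r

theorem pvTrim_prefix (cd : List Int) : pvTrim cd <+: cd := by
  induction cd with
  | nil => simp [pvTrim]
  | cons a t ih =>
    simp only [pvTrim]
    split
    · exact List.nil_prefix
    · exact List.cons_prefix_cons.mpr ⟨rfl, ih⟩

theorem pvTrim_concat_zero (cd : List Int) : pvTrim (cd ++ [0]) = pvTrim cd := by
  induction cd with
  | nil => simp [pvTrim]
  | cons a t ih => simp [pvTrim, ih]

theorem pvTrim_concat_ne (cd : List Int) (a : Int) (ha : a ≠ 0) :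
    pvTrim (cd ++ [a]) = cd ++ [a] := by
  induction cd with
  | nil => simp [pvTrim, ha]
  | cons x t ih => simp [pvTrim, ih]

theorem pvAwhile_stable (cd t : List Int) :
    ∀ n (i : Int), (i + 1).toNat = n → i < (cd.length : Int) →
      pvAwhile (cd ++ t) i = pvAwhile cd i := by
  intro n
  induction n with
  | zero =>
    intro i hn _
    have hneg : ¬ (i ≥ 0 ∧ PySem.List.pyGet? (cd ++ t) i = some 0) := by
      intro h; omega
    have hneg' : ¬ (i ≥ 0 ∧ PySem.List.pyGet? cd i = some 0) := by
      intro h; omega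
    rw [pvAwhile, dif_neg hneg, pvAwhile, dif_neg hneg']
  | succ m ih =>
    intro i hn hi
    have hi0 : 0 ≤ i := by omega
    have hget : PySem.List.pyGet? (cd ++ t) i = PySem.List.pyGet? cd i := by
      have h1 : i < ((cd ++ t).length : Int) := by simp; omega
      simp only [PySem.List.pyGet?, PySem.List.pyIdx?, hi0, if_pos hi, if_pos h1]
      exact List.getElem?_append_left (by omega)
    by_cases hc : i ≥ 0 ∧ PySem.List.pyGet? cd i = some 0
    · rw [pvAwhile, dif_pos (hget ▸ hc)]
      conv_rhs => rw [pvAwhile, dif_pos hc]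
      exact ih (i - 1) (by omega) (by omega)
    · rw [pvAwhile, dif_neg (by rw [hget]; exact hc)]
      conv_rhs => rw [pvAwhile, dif_neg hc]

theorem pvAwhile_trim (cd : List Int) :
    pvAwhile cd ((cd.length : Int) - 1) = ((pvTrim cd).length : Int) - 1 := by
  induction cd using List.reverseRecOn with
  | nil =>
    rw [pvAwhile, dif_neg (by simp)]
    simp [pvTrim]
  | append_singleton t a ih =>
    have hlen : ((t ++ [a]).length : Int) - 1 = (t.length : Int) := by simp
    have hget : PySem.List.pyGet? (t ++ [a]) (((t ++ [a]).length : Int) - 1) = some a := by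
      rw [hlen]
      simp [PySem.List.pyGet?, PySem.List.pyIdx?]
    by_cases ha : a = 0
    · subst ha
      rw [pvAwhile, dif_pos ⟨by simp, hget⟩]
      have hstep : ((t ++ [(0:Int)]).length : Int) - 1 - 1 = (t.length : Int) - 1 := by
        simp
      rw [hstep,
        pvAwhile_stable t [(0:Int)] ((t.length : Int)).toNat ((t.length : Int) - 1)
          (by omega) (by omega),
        ih, pvTrim_concat_zero]
    · rw [pvAwhile, dif_neg (by rw [hget]; simp [ha]), hlen, pvTrim_concat_ne t a ha]
      simp

theorem pvA_char (cd1 cd2 : List Int) :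
    eq_except_trailing_zeros_py cd1 cd2 = (pvTrim cd1 == pvTrim cd2) := by
  unfold eq_except_trailing_zeros_py
  simp only [pvAwhile_trim, sub_add_cancel, PySem.List.slice_to_natCast]
  rw [← List.prefix_iff_eq_take.mp (pvTrim_prefix cd1),
    ← List.prefix_iff_eq_take.mp (pvTrim_prefix cd2)]

theorem pvBloop_nil_right : ∀ xs : List Int, (pvBloop xs [] = true ↔ pvTrim xs = []) := by
  intro xs
  induction xs with
  | nil => simp [pvBloop, pvTrim]
  | cons a t ih =>
    simp only [pvBloop, pvTrim, Bool.and_eq_true, beq_iff_eq, ih]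
    constructor
    · rintro ⟨ha, ht⟩; simp [ha, ht]
    · intro h; split at h
      · exact ⟨(by tauto), (by tauto)⟩
      · simp at h

theorem pvBloop_nil_left : ∀ ys : List Int, (pvBloop [] ys = true ↔ pvTrim ys = []) := by
  intro ys
  induction ys with
  | nil => simp [pvBloop, pvTrim]
  | cons b t ih =>
    simp only [pvBloop, pvTrim, Bool.and_eq_true, beq_iff_eq, ih]
    constructor
    · rintro ⟨hb, ht⟩; simp [← hb, ht]
    · intro h; split at h
      · exact ⟨(by tauto), (by tauto)⟩
      · simp at h

theorem pvBloop_iff : ∀ (xs ys : List Int), (pvBloop xs ys = true ↔ pvTrim xs = pvTrim ys) := by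
  intro xs
  induction xs with
  | nil =>
    intro ys
    rw [pvBloop_nil_left]
    simp [pvTrim, eq_comm]
  | cons a t ih =>
    intro ys
    cases ys with
    | nil =>
      rw [pvBloop_nil_right]
      simp [pvTrim]
    | cons b u =>
      simp only [pvBloop, Bool.and_eq_true, beq_iff_eq, ih u]
      constructor
      · rintro ⟨hab, htu⟩
        simp [pvTrim, hab, htu]
      · intro h
        simp only [pvTrim] at h
        by_cases h1 : pvTrim t = [] <;> by_cases h2 : pvTrim u = [] <;>
          by_cases ha : a = 0 <;> by_cases hb : b = 0 <;>
          simp [h1, h2, ha, hb] at h ⊢ <;> tauto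

-- ===== VERDICT (by name: the statement is the Claim_ definition above) =====
theorem eq_except_trailing_zeros_py_spec : Claim_equal_eq_except_trailing_zeros_py := by
  intro cd1 cd2 _
  unfold Spec_eq_except_trailing_zeros_py eq_except_trailing_zeros_py_alt
  rw [pvA_char]
  rcases hb : pvBloop cd1 cd2 with _ | _
  · have : ¬ pvTrim cd1 = pvTrim cd2 := fun h => by
      rw [← pvBloop_iff] at h; rw [hb] at h; cases h
    simp [this]
  · have := (pvBloop_iff cd1 cd2).mp hb
    simp [this]
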